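-- pv_equiv track=rewrite | github.com/taylorott/Advent_of_Code | src/Year_2022/Day23/Solution.py | get_grid_bounds
-- ===== SOURCE A (Python) =====
-- def get_grid_bounds(current_state):
--     has_initialized = False
--     i_min = None
--     i_max = None
--     j_min = None
--     j_max = None
--
--     for key in current_state.keys():
--         if not has_initialized:
--             has_initialized = True
--             i_min = key[0]
--             i_max = key[0]
--             j_min = key[1]
--             j_max = key[1]
--
--         i_min = min(i_min,key[0])
--         i_max = max(i_max,key[0])
--         j_min = min(j_min,key[1])
--         j_max = max(j_max,key[1])
--
--     return i_min,i_max,j_min,j_max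
-- ===== SOURCE B (Python) =====
-- def get_grid_bounds(current_state):
--     if not current_state:
--         return None, None, None, None
--     rows = [key[0] for key in current_state.keys()]
--     cols = [key[1] for key in current_state.keys()]
--     return min(rows), max(rows), min(cols), max(cols)
-- ===== Notes on version B (the rewrite author's own statement) =====
-- stated objective: simpler
-- what changed: Replaces A's single fused loop with a Boolean init flag and four None-seeded accumulators by an explicit empty-dict guard followed by a transpose into the two coordinate lists and four built-in reductions (min/max per axis).
import Mathlib
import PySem

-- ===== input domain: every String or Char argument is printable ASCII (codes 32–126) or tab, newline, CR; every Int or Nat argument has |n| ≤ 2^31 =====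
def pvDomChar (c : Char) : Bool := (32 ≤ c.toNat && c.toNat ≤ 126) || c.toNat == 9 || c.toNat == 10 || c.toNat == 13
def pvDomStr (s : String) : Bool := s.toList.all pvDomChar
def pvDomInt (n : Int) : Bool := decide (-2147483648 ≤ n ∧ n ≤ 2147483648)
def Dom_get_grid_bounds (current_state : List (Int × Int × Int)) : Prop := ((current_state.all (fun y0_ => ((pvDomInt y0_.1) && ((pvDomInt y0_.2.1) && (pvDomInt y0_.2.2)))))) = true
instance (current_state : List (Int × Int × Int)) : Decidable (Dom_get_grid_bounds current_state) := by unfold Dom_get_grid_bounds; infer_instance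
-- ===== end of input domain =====

-- B replaces A's fused init-flag accumulator loop with an empty guard plus per-axis list transposition and built-in min/max reductions (objective: simpler).

-- ===== PORT A =====
-- Python's min/max is applied to i_min etc. only after initialization, when they are `some`; on `none` (unreachable) the port keeps `none`.
def pvOptMin (o : Option Int) (k : Int) : Option Int :=
  match o with
  | some v => some (min v k)
  | none => none

def pvOptMax (o : Option Int) (k : Int) : Option Int :=
  match o with
  | some v => some (max v k)
  | none => none

def pvStepA (st : Bool × Option Int × Option Int × Option Int × Option Int)
    (key : Int × Int × Int) : Bool × Option Int × Option Int × Option Int × Option Int :=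
  let (has_initialized, i_min, i_max, j_min, j_max) := st
  let (has_initialized, i_min, i_max, j_min, j_max) :=
    if !has_initialized then
      (true, some key.1, some key.1, some key.2.1, some key.2.1)
    else (has_initialized, i_min, i_max, j_min, j_max)
  (has_initialized, pvOptMin i_min key.1, pvOptMax i_max key.1,
    pvOptMin j_min key.2.1, pvOptMax j_max key.2.1)

def get_grid_bounds (current_state : List (Int × Int × Int)) : Option Int × Option Int × Option Int × Option Int :=
  let st := current_state.foldl pvStepA (false, none, none, none, none)
  (st.2.1, st.2.2.1, st.2.2.2.1, st.2.2.2.2)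

-- ===== PORT B =====
def get_grid_bounds_alt (current_state : List (Int × Int × Int)) : Option Int × Option Int × Option Int × Option Int :=
  match current_state with
  | [] => (none, none, none, none)
  | _ =>
    let rows := current_state.map (fun key => key.1)
    let cols := current_state.map (fun key => key.2.1)
    (rows.min?, rows.max?, cols.min?, cols.max?)

-- ===== PRECONDITION & SPEC =====
def Spec_get_grid_bounds (current_state : List (Int × Int × Int)) (out : Option Int × Option Int × Option Int × Option Int) : Prop := out = get_grid_bounds_alt current_state
instance (current_state : List (Int × Int × Int)) (out : Option Int × Option Int × Option Int × Option Int) : Decidable (Spec_get_grid_bounds current_state out) := by unfold Spec_get_grid_bounds; infer_instance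

-- ===== CLAIM (what is proved, stated in full; the proofs are below) =====
def Claim_equal_get_grid_bounds : Prop := ∀ (current_state : List (Int × Int × Int)), Dom_get_grid_bounds current_state → Spec_get_grid_bounds current_state (get_grid_bounds current_state)

-- ===== LEMMAS AND PROOFS =====

theorem foldA_init (l : List (Int × Int × Int)) (a b c d : Int) :
    l.foldl pvStepA (true, some a, some b, some c, some d)
    = (true,
        some (l.foldl (fun m key => min m key.1) a),
        some (l.foldl (fun m key => max m key.1) b),
        some (l.foldl (fun m key => min m key.2.1) c),
        some (l.foldl (fun m key => max m key.2.1) d)) := by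
  induction l generalizing a b c d with
  | nil => rfl
  | cons k t ih =>
    simp only [List.foldl_cons, pvStepA, pvOptMin, pvOptMax]
    exact ih _ _ _ _

theorem get_grid_bounds_spec : Claim_equal_get_grid_bounds := by
  intro cs _
  unfold Spec_get_grid_bounds
  cases cs with
  | nil => rfl
  | cons k t =>
    show (get_grid_bounds (k :: t)) = _
    unfold get_grid_bounds get_grid_bounds_alt
    simp only [List.foldl_cons, pvStepA, pvOptMin, pvOptMax, Bool.not_false, if_pos,
      List.map_cons, List.min?_cons', List.max?_cons', List.foldl_map, min_self, max_self,
      foldA_init]
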